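-- pv_equiv track=rewrite | github.com/Ivank100/SP1_deploy | backend/utils/citations.py | _build_number_clause
-- ===== SOURCE A (Python) =====
-- from typing import Dict, List, Optional, Tuple
--
-- def _build_number_clause(numbers: List[int], singular: str, plural: str) -> str:
--     """Return a human-readable clause describing the provided numbered units."""
--     unique_values = sorted(set(numbers))
--     if not unique_values:
--         return ""
--     if len(unique_values) == 1:
--         return f"{singular} {unique_values[0]}"
--
--     ranges: List[str] = []
--     start = unique_values[0]
--     end = unique_values[0]
--
--     for current in unique_values[1:]:
--         if current == end + 1:
--             end = current
--             continue
--
--         ranges.append(str(start) if start == end else f"{start}-{end}")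
--         start = current
--         end = current
--
--     ranges.append(str(start) if start == end else f"{start}-{end}")
--     return f"{plural} {', '.join(ranges)}"
-- ===== SOURCE B (Python) =====
-- def _build_number_clause(numbers, singular, plural):
--     """Return a human-readable clause describing the provided numbered units."""
--     pool = set(numbers)
--     unique = sorted(pool)
--     if not unique:
--         return ""
--     if len(unique) == 1:
--         return f"{singular} {unique[0]}"
--     # A value starts a run iff its predecessor is absent; it ends one iff its
--     # successor is absent.  Pairing the i-th start with the i-th end (both lists
--     # are increasing) yields exactly the maximal runs of consecutive integers.
--     starts = [v for v in unique if v - 1 not in pool]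
--     ends = [v for v in unique if v + 1 not in pool]
--     clauses = [str(a) if a == b else f"{a}-{b}" for a, b in zip(starts, ends)]
--     return f"{plural} {', '.join(clauses)}"
-- ===== Notes on version B (the rewrite author's own statement) =====
-- stated objective: alternative
-- what changed: Replaces A's sequential start/end accumulator loop with a stateless set-membership boundary test: a value starts a run iff value-1 is not in the set and ends a run iff value+1 is not in the set; the two boundary lists are zipped to form the range clauses.
import Mathlib
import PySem

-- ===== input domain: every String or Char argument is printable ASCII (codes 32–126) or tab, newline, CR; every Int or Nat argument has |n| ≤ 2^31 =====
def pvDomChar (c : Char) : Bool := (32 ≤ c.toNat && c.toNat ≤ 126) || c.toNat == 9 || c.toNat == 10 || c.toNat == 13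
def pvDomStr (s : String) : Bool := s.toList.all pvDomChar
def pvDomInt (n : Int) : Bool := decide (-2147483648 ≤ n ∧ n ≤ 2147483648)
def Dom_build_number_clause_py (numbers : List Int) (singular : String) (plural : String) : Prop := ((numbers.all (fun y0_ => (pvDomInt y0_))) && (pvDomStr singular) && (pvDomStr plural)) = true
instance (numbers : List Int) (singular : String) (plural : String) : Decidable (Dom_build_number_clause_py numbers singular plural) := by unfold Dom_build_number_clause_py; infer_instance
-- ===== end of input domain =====

-- B replaces A's sequential start/end accumulator loop by a stateless set-membership
-- boundary test (v starts a run iff v-1 is absent, ends one iff v+1 is absent); same cost.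

-- ===== PORT A =====
-- the conditional range-formatting expression A writes twice (str(start) if start == end else f"{start}-{end}")
def pyFmt (s e : Int) : String :=
  if s == e then PySem.Int.toStr s else PySem.Int.toStr s ++ "-" ++ PySem.Int.toStr e

-- A's loop body, on state (ranges, start, end)
def stepA (st : List String × Int × Int) (current : Int) : List String × Int × Int :=
  if current == st.2.2 + 1 then (st.1, st.2.1, current)
  else (st.1 ++ [pyFmt st.2.1 st.2.2], current, current)

def build_number_clause_py (numbers : List Int) (singular : String) (plural : String) : String :=
  let unique_values := PySem.List.sorted (PySem.Set.ofList numbers) (fun x => x) false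
  match unique_values with
  | [] => ""
  | [x] => singular ++ " " ++ PySem.Int.toStr x
  | x :: rest =>
    let st := rest.foldl stepA ([], x, x)
    plural ++ " " ++ PySem.Str.join ", " (st.1 ++ [pyFmt st.2.1 st.2.2])

-- ===== PORT B =====
-- Source B's local 'pool = set(numbers)' is inlined at its use sites
def build_number_clause_py_alt (numbers : List Int) (singular : String) (plural : String) : String :=
  let unique := PySem.List.sorted (PySem.Set.ofList numbers) (fun x => x) false
  if unique.isEmpty then ""
  else if unique.length == 1 then singular ++ " " ++ PySem.Int.toStr (unique.headD 0)
  else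
    let starts := unique.filter (fun v => !((PySem.Set.ofList numbers).contains (v - 1)))
    let ends := unique.filter (fun v => !((PySem.Set.ofList numbers).contains (v + 1)))
    let clauses := (starts.zip ends).map
      (fun ab => if ab.1 == ab.2 then PySem.Int.toStr ab.1
                 else PySem.Int.toStr ab.1 ++ "-" ++ PySem.Int.toStr ab.2)
    plural ++ " " ++ PySem.Str.join ", " clauses

-- ===== PRECONDITION & SPEC =====
def Spec_build_number_clause_py (numbers : List Int) (singular : String) (plural : String) (out : String) : Prop := out = build_number_clause_py_alt numbers singular plural
instance (numbers : List Int) (singular : String) (plural : String) (out : String) : Decidable (Spec_build_number_clause_py numbers singular plural out) := by unfold Spec_build_number_clause_py; infer_instance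

-- ===== CLAIM (what is proved, stated in full; the proofs are below) =====
def Claim_equal_build_number_clause_py : Prop := ∀ (numbers : List Int) (singular : String) (plural : String), Dom_build_number_clause_py numbers singular plural → Spec_build_number_clause_py numbers singular plural (build_number_clause_py numbers singular plural)

-- ===== LEMMAS AND PROOFS =====

-- runs of consecutive integers, described by (start, end) pairs, traversed A's way
def runsSE (s e : Int) : List Int → List (Int × Int)
  | [] => [(s, e)]
  | c :: r => if c == e + 1 then runsSE s c r else (s, e) :: runsSE c c r

-- run starts / run ends of a strictly increasing list, read off adjacent pairs
def bStarts : List Int → List Int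
  | [] => []
  | [x] => [x]
  | x :: y :: t => if y == x + 1 then x :: (bStarts (y :: t)).tail else x :: bStarts (y :: t)

def bEnds : List Int → List Int
  | [] => []
  | [x] => [x]
  | x :: y :: t => if y == x + 1 then bEnds (y :: t) else x :: bEnds (y :: t)

theorem foldA_runsSE (rest : List Int) (R : List String) (s e : Int) :
    (rest.foldl stepA (R, s, e)).1 ++ [pyFmt (rest.foldl stepA (R, s, e)).2.1 (rest.foldl stepA (R, s, e)).2.2]
      = R ++ (runsSE s e rest).map (fun p => pyFmt p.1 p.2) := by
  induction rest generalizing R s e with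
  | nil => simp [runsSE]
  | cons c r ih =>
    by_cases h : c = e + 1
    · simp [stepA, runsSE, h, ih]
    · simp [stepA, runsSE, h, ih]

theorem bStarts_head (x : Int) (r : List Int) :
    bStarts (x :: r) = x :: (bStarts (x :: r)).tail := by
  cases r with
  | nil => rfl
  | cons y t =>
    unfold bStarts
    split_ifs <;> rfl

theorem zip_bStarts_bEnds (t : List Int) (s e : Int) :
    ((s :: (bStarts (e :: t)).tail).zip (bEnds (e :: t))) = runsSE s e t := by
  induction t generalizing s e with
  | nil => rfl
  | cons c t' ih =>
    by_cases h : c = e + 1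
    · subst h
      unfold bStarts bEnds runsSE
      simp only [beq_self_eq_true, if_true, List.tail_cons]
      exact ih s (e + 1)
    · have hb : (c == e + 1) = false := by simp [h]
      unfold bStarts bEnds runsSE
      simp only [hb, Bool.false_eq_true, if_false, List.tail_cons]
      rw [bStarts_head c t']
      simp only [List.zip_cons_cons]
      exact congrArg (fun l => (s, e) :: l) (ih c c)

theorem filter_starts (u : List Int) (hp : u.Pairwise (· < ·)) :
    u.filter (fun v => !(u.contains (v - 1))) = bStarts u := by
  induction u with
  | nil => rfl
  | cons x r ih =>
    have hx : ∀ v ∈ r, x < v := (List.pairwise_cons.mp hp).1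
    have hpr : r.Pairwise (· < ·) := (List.pairwise_cons.mp hp).2
    cases r with
    | nil =>
      simp [bStarts, List.filter]
    | cons y t =>
      have hy : x < y := hx y (by simp)
      have ht : ∀ v ∈ t, y < v := (List.pairwise_cons.mp hpr).1
      have hp_x : (!((x :: y :: t).contains (x - 1))) = true := by
        simp only [Bool.not_eq_true', List.contains_eq_mem, decide_eq_false_iff_not, List.mem_cons]
        rintro (h | h | hv)
        · omega
        · omega
        · have := ht _ hv; omega
      have hq_y : (!((y :: t).contains (y - 1))) = true := by
        simp only [Bool.not_eq_true', List.contains_eq_mem, decide_eq_false_iff_not, List.mem_cons]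
        rintro (h | hv)
        · omega
        · have := ht _ hv; omega
      have hagree : ∀ v ∈ t, ((x :: y :: t).contains (v - 1)) = ((y :: t).contains (v - 1)) := by
        intro v hv
        have h1 : y < v := ht v hv
        simp only [List.contains_eq_mem, List.mem_cons, decide_eq_decide]
        constructor
        · rintro (h | h)
          · exact absurd h (by omega)
          · exact h
        · intro h; right; exact h
      have hfcong : t.filter (fun v => !((x :: y :: t).contains (v - 1)))
          = t.filter (fun v => !((y :: t).contains (v - 1))) :=
        List.filter_congr (fun v hv => by rw [hagree v hv])
      have hih := ih hpr
      rw [List.filter_cons_of_pos (p := fun v => !((y :: t).contains (v - 1))) hq_y] at hih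
      unfold bStarts
      by_cases hc : y = x + 1
      · subst hc
        have hp_y : (!((x :: (x + 1) :: t).contains (x + 1 - 1))) = false := by
          simp only [Bool.not_eq_false', List.contains_eq_mem, decide_eq_true_eq, List.mem_cons]
          left; omega
        simp only [beq_self_eq_true, if_true]
        rw [List.filter_cons_of_pos (p := fun v => !((x :: (x + 1) :: t).contains (v - 1))) hp_x,
            List.filter_cons_of_neg (p := fun v => !((x :: (x + 1) :: t).contains (v - 1)))
              (by simp only [hp_y]; simp),
            hfcong, ← hih]
        simp
      · have hp_y : (!((x :: y :: t).contains (y - 1))) = true := by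
          simp only [Bool.not_eq_true', List.contains_eq_mem, decide_eq_false_iff_not, List.mem_cons]
          rintro (h | h | hv)
          · omega
          · omega
          · have := ht _ hv; omega
        have hb : (y == x + 1) = false := by simp [hc]
        simp only [hb, Bool.false_eq_true, if_false]
        rw [List.filter_cons_of_pos (p := fun v => !((x :: y :: t).contains (v - 1))) hp_x,
            List.filter_cons_of_pos (p := fun v => !((x :: y :: t).contains (v - 1))) hp_y,
            hfcong, ← hih]

theorem filter_ends (u : List Int) (hp : u.Pairwise (· < ·)) :
    u.filter (fun v => !(u.contains (v + 1))) = bEnds u := by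
  induction u with
  | nil => rfl
  | cons x r ih =>
    have hx : ∀ v ∈ r, x < v := (List.pairwise_cons.mp hp).1
    have hpr : r.Pairwise (· < ·) := (List.pairwise_cons.mp hp).2
    cases r with
    | nil =>
      simp [bEnds, List.filter]
    | cons y t =>
      have hy : x < y := hx y (by simp)
      have ht : ∀ v ∈ t, y < v := (List.pairwise_cons.mp hpr).1
      have hagree : ∀ v ∈ y :: t, ((x :: y :: t).contains (v + 1)) = ((y :: t).contains (v + 1)) := by
        intro v hv
        have h1 : y ≤ v := by
          rcases List.mem_cons.mp hv with h | h
          · exact le_of_eq h.symm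
          · exact le_of_lt (ht v h)
        simp only [List.contains_eq_mem, List.mem_cons, decide_eq_decide]
        constructor
        · rintro (h | h)
          · exact absurd h (by omega)
          · exact h
        · intro h; right; exact h
      have hfcong : (y :: t).filter (fun v => !((x :: y :: t).contains (v + 1)))
          = (y :: t).filter (fun v => !((y :: t).contains (v + 1))) :=
        List.filter_congr (fun v hv => by rw [hagree v hv])
      have hih := ih hpr
      unfold bEnds
      by_cases hc : y = x + 1
      · subst hc
        have hp_x : (!((x :: (x + 1) :: t).contains (x + 1))) = false := by
          simp
        simp only [beq_self_eq_true, if_true]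
        rw [List.filter_cons_of_neg (p := fun v => !((x :: (x + 1) :: t).contains (v + 1)))
              (by simp only [hp_x]; simp),
            hfcong, hih]
      · have hp_x : (!((x :: y :: t).contains (x + 1))) = true := by
          simp only [Bool.not_eq_true', List.contains_eq_mem, decide_eq_false_iff_not, List.mem_cons]
          rintro (h | h | hv)
          · omega
          · omega
          · have := ht _ hv; omega
        have hb : (y == x + 1) = false := by simp [hc]
        simp only [hb, Bool.false_eq_true, if_false]
        rw [List.filter_cons_of_pos (p := fun v => !((x :: y :: t).contains (v + 1))) hp_x,
            hfcong, hih]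

-- the two boundary filters over the sorted deduplicated list, zipped, are exactly A's runs
theorem zip_filters_eq_runs (x : Int) (r : List Int)
    (hp : (x :: r).Pairwise (· < ·)) :
    (((x :: r).filter (fun v => !((x :: r).contains (v - 1)))).zip
      ((x :: r).filter (fun v => !((x :: r).contains (v + 1))))) = runsSE x x r := by
  rw [filter_starts _ hp, filter_ends _ hp, bStarts_head x r]
  exact zip_bStarts_bEnds r x x

-- ===== VERDICT (by name: the statement is the Claim_ definition above) =====
theorem build_number_clause_py_spec : Claim_equal_build_number_clause_py := by
  intro numbers singular plural _
  unfold Spec_build_number_clause_py build_number_clause_py build_number_clause_py_alt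
  have hpair := PySem.List.sorted_ofList_pairwise_lt (xs := numbers)
  have hmem : ∀ w : Int, (PySem.Set.ofList numbers).contains w
      = (PySem.List.sorted (PySem.Set.ofList numbers) (fun x => x) false).contains w := by
    intro w
    show List.contains (PySem.Set.ofList numbers) w = _
    rw [List.contains_eq_mem, List.contains_eq_mem]
    exact decide_eq_decide.mpr (PySem.List.mem_sorted (PySem.Set.ofList numbers) (fun x : Int => x) false w).symm
  cases hu : PySem.List.sorted (PySem.Set.ofList numbers) (fun x => x) false with
  | nil => rfl
  | cons x rest =>
    cases rest with
    | nil => rfl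
    | cons c r =>
      rw [hu] at hpair hmem
      show plural ++ " " ++ PySem.Str.join ", " _ = _
      have hm1 : (fun v : Int => !(PySem.Set.ofList numbers).contains (v - 1))
          = (fun v : Int => !((x :: c :: r).contains (v - 1))) := by
        funext v; rw [hmem (v - 1)]
      have hm2 : (fun v : Int => !(PySem.Set.ofList numbers).contains (v + 1))
          = (fun v : Int => !((x :: c :: r).contains (v + 1))) := by
        funext v; rw [hmem (v + 1)]
      have hA := foldA_runsSE (c :: r) [] x x
      rw [List.nil_append] at hA
      simp only [List.isEmpty_cons, Bool.false_eq_true, if_false, List.length_cons,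
        List.headD_cons, hm1, hm2]
      have hlen : (r.length + 1 + 1 == 1) = false := by simp
      simp only [hlen, Bool.false_eq_true, if_false]
      refine congrArg (fun l => plural ++ " " ++ PySem.Str.join ", " l) ?_
      rw [hA, zip_filters_eq_runs x (c :: r) hpair]
      rfl
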